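-- pv_equiv track=rewrite | github.com/ajanderson1/whatsapp_chat_autoexport | whatsapp_chat_autoexport/sources/transcript_source.py | _detect_md_media
-- ===== SOURCE A (Python) =====
-- from typing import Dict, List, Optional, Tuple
--
-- def _detect_md_media(content: str) -> Tuple[bool, Optional[str]]:
--     """
--     Detect typed media tags in new-format transcripts.
--
--     Tags: ``<photo>``, ``<video>``, ``<voice>``, ``<document>``, ``<sticker>``
--     """
--     tag_map = {
--         "<photo>": "image",
--         "<video>": "video",
--         "<voice>": "audio",
--         "<document>": "document",
--         "<sticker>": "sticker",
--     }
--     content_stripped = content.strip()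
--     for tag, media_type in tag_map.items():
--         if content_stripped.startswith(tag):
--             return True, media_type
--     return False, None
-- ===== SOURCE B (Python) =====
-- _TAG_MAP = {
--     "<photo>": "image",
--     "<video>": "video",
--     "<voice>": "audio",
--     "<document>": "document",
--     "<sticker>": "sticker",
-- }
--
-- def _detect_md_media(content):
--     s = content.strip()
--     if not s.startswith("<"):
--         return False, None
--     i = s.find(">")
--     if i == -1:
--         return False, None
--     media = _TAG_MAP.get(s[:i + 1])
--     if media is None:
--         return False, None
--     return True, media
-- ===== Notes on version B (the rewrite author's own statement) =====
-- stated objective: idiomatic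
-- what changed: B replaces A's loop of five startswith probes over tag_map.items() by parsing the leading angle-bracket token once (strip, check the opening bracket, find the closing bracket, slice it out) and doing a single dict lookup.
import Mathlib
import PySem

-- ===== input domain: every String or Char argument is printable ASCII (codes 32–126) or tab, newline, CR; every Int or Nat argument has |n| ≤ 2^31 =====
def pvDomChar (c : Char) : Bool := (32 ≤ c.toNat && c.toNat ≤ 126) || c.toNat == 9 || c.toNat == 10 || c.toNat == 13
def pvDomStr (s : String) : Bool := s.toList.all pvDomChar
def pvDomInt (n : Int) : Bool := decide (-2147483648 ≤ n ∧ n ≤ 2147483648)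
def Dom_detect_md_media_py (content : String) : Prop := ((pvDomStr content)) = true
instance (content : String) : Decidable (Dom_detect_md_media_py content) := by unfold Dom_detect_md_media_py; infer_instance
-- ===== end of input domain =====

-- B replaces A's sequence of startswith probes by parsing the leading "<...>" token once and doing a single dict lookup (idiomatic; same cost).

-- ===== PORT A =====
-- A's for-loop over tag_map.items() with early return
def detect_md_media_loop (s : String) : List (String × String) → Bool × Option String
  | [] => (false, none)
  | (tag, media) :: rest =>
      if PySem.Str.startswith s tag then (true, some media)
      else detect_md_media_loop s rest

def detect_md_media_py (content : String) : Bool × Option String :=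
  detect_md_media_loop (PySem.Str.strip content)
    [("<photo>", "image"), ("<video>", "video"), ("<voice>", "audio"),
     ("<document>", "document"), ("<sticker>", "sticker")]

-- ===== PORT B =====
-- module-level dict _TAG_MAP of Source B
def pvTagMap : PySem.Dict String String :=
  PySem.Dict.mk
    [("<photo>", "image"), ("<video>", "video"), ("<voice>", "audio"),
     ("<document>", "document"), ("<sticker>", "sticker")]

def detect_md_media_py_alt (content : String) : Bool × Option String :=
  let s := PySem.Str.strip content
  if !(PySem.Str.startswith s "<") then (false, none)
  else
    let i := PySem.Str.find s ">"
    if i == -1 then (false, none)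
    else
      match PySem.Dict.get? pvTagMap (PySem.Str.slice s none (some (i + 1))) with
      | some media => (true, some media)
      | none => (false, none)

-- ===== PRECONDITION & SPEC =====
def Spec_detect_md_media_py (content : String) (out : Bool × Option String) : Prop := out = detect_md_media_py_alt content
instance (content : String) (out : Bool × Option String) : Decidable (Spec_detect_md_media_py content out) := by unfold Spec_detect_md_media_py; infer_instance

-- ===== CLAIM (what is proved, stated in full; the proofs are below) =====
def Claim_equal_detect_md_media_py : Prop := ∀ (content : String), Dom_detect_md_media_py content → Spec_detect_md_media_py content (detect_md_media_py content)

-- ===== LEMMAS AND PROOFS =====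

-- B's body as a function of the stripped string (proof-side abbreviation)
def pvAltBody (s : String) : Bool × Option String :=
  if !(PySem.Str.startswith s "<") then (false, none)
  else
    let i := PySem.Str.find s ">"
    if i == -1 then (false, none)
    else
      match PySem.Dict.get? pvTagMap (PySem.Str.slice s none (some (i + 1))) with
      | some media => (true, some media)
      | none => (false, none)

lemma pv_alt_eq (content : String) :
    detect_md_media_py_alt content = pvAltBody (PySem.Str.strip content) := rfl

-- first '>' in p ++ '>' :: r with '>' ∉ p sits at index p.length
lemma pv_find_gt (t p r : List Char) (hgt : '>' ∉ p) (ht : t = p ++ '>' :: r) :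
    PySem.Chars.find t ['>'] = (p.length : Int) := by
  have hinfix : ['>'] <:+: t := ⟨p, r, by simp [ht]⟩
  have hne : PySem.Chars.find t ['>'] ≠ -1 :=
    fun h => ((PySem.Chars.find_eq_neg_one_iff _ _).mp h) hinfix
  have hff : PySem.Chars.findFrom t ['>'] ((0 : Nat) : Int) none = PySem.Chars.find t ['>'] := by
    simp [PySem.Chars.findFrom_zero]
  obtain ⟨hnn, hpre, hmin⟩ :=
    PySem.Chars.findFrom_natCast_spec t ['>'] 0 (Nat.zero_le _) (by rw [hff]; exact hne)
  rw [hff] at hnn hpre hmin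
  set n := (PySem.Chars.find t ['>']).toNat with hn
  have hle : n ≤ p.length := by
    by_contra hlt
    push_neg at hlt
    exact hmin p.length (Nat.zero_le _) hlt ⟨r, by rw [ht, List.drop_left]; rfl⟩
  have hge : p.length ≤ n := by
    by_contra hlt
    push_neg at hlt
    obtain ⟨w, hw⟩ := hpre
    have h1 : t[n]? = some '>' := by
      have h := congrArg List.head? hw
      rw [List.head?_drop] at h
      simpa using h.symm
    have h2 : p[n]? = some '>' := by
      rw [ht, List.getElem?_append_left hlt] at h1
      exact h1
    exact hgt (List.mem_of_getElem? h2)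
  have : n = p.length := le_antisymm hle hge
  omega

-- if a whole tag '<'++q++'>' (no inner '>') prefixes the stripped string, B returns its media
lemma pv_alt_pos (s : String) (q : List Char) (m : String)
    (hgt : '>' ∉ ('<' :: q))
    (hget : PySem.Dict.get? pvTagMap (String.ofList ('<' :: q ++ ['>'])) = some m)
    (hpre : ('<' :: q ++ ['>']) <+: s.toList) :
    pvAltBody s = (true, some m) := by
  obtain ⟨r, hr⟩ := hpre
  have ht : s.toList = ('<' :: q) ++ '>' :: r := by
    rw [← hr]; simp
  have hsw : PySem.Str.startswith s "<" = true := by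
    rw [PySem.Str.startswith_eq]
    show List.isPrefixOf _ _ = true
    rw [List.isPrefixOf_iff_prefix, ht]
    exact ⟨q ++ '>' :: r, by simp⟩
  have htl : (">" : String).toList = ['>'] := rfl
  have hfind : PySem.Str.find s ">" = ((('<' :: q).length : Nat) : Int) := by
    rw [PySem.Str.find_eq, htl]
    exact pv_find_gt _ _ _ hgt ht
  have hslice : PySem.Str.slice s none (some (PySem.Str.find s ">" + 1)) =
      String.ofList ('<' :: q ++ ['>']) := by
    rw [← String.toList_inj, PySem.Str.toList_slice, hfind]
    show PySem.List.slice _ _ _ = _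
    rw [PySem.List.slice_to _ (by positivity)]
    rw [ht]
    have hlen : (('<' :: q) ++ ['>']).length = ((('<' :: q).length : Int) + 1).toNat := by
      simp only [List.length_append, List.length_cons, List.length_nil]
      omega
    rw [show ('<' :: q) ++ '>' :: r = (('<' :: q) ++ ['>']) ++ r by simp]
    rw [List.take_left' hlen]
    rw [String.toList_ofList]
  simp only [pvAltBody, hsw, Bool.not_true, Bool.false_eq_true, if_false]
  rw [hslice, hget, hfind]
  have hne2 : ((('<' :: q).length : Int) == (-1 : Int)) = false := by
    simp only [beq_eq_false_iff_ne, ne_eq]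
    omega
  rw [hne2]
  simp

-- any string B looks up in the dict is a prefix of the stripped string
lemma pv_slice_prefix (s : String) (hne : PySem.Str.find s ">" ≠ -1) :
    (PySem.Str.slice s none (some (PySem.Str.find s ">" + 1))).toList <+: s.toList := by
  have htl : (">" : String).toList = ['>'] := rfl
  have hne' : PySem.Chars.find s.toList ['>'] ≠ -1 := by
    rw [← htl, ← PySem.Str.find_eq]
    exact hne
  have hff : PySem.Chars.findFrom s.toList ['>'] ((0 : Nat) : Int) none
      = PySem.Chars.find s.toList ['>'] := by
    simp [PySem.Chars.findFrom_zero]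
  obtain ⟨hnn, -, -⟩ :=
    PySem.Chars.findFrom_natCast_spec s.toList ['>'] 0 (Nat.zero_le _) (by rw [hff]; exact hne')
  rw [hff] at hnn
  have hnn' : 0 ≤ PySem.Str.find s ">" := by
    rw [PySem.Str.find_eq, htl]
    exact_mod_cast hnn
  rw [PySem.Str.toList_slice]
  show PySem.List.slice _ _ _ <+: _
  rw [PySem.List.slice_to _ (by omega)]
  exact List.take_prefix _ _

-- a successful lookup in pvTagMap means the key is one of the five tags
lemma pv_get_mem (X m : String) (h : PySem.Dict.get? pvTagMap X = some m) :
    X = "<photo>" ∨ X = "<video>" ∨ X = "<voice>" ∨ X = "<document>" ∨ X = "<sticker>" := by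
  simp only [pvTagMap, PySem.Dict.get?, List.find?] at h
  by_cases e1 : X = "<photo>"
  · exact Or.inl e1
  by_cases e2 : X = "<video>"
  · exact Or.inr (Or.inl e2)
  by_cases e3 : X = "<voice>"
  · exact Or.inr (Or.inr (Or.inl e3))
  by_cases e4 : X = "<document>"
  · exact Or.inr (Or.inr (Or.inr (Or.inl e4)))
  by_cases e5 : X = "<sticker>"
  · exact Or.inr (Or.inr (Or.inr (Or.inr e5)))
  rw [show (("<photo>" : String) == X) = false from beq_eq_false_iff_ne.mpr (fun hh => e1 hh.symm),
      show (("<video>" : String) == X) = false from beq_eq_false_iff_ne.mpr (fun hh => e2 hh.symm),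
      show (("<voice>" : String) == X) = false from beq_eq_false_iff_ne.mpr (fun hh => e3 hh.symm),
      show (("<document>" : String) == X) = false from beq_eq_false_iff_ne.mpr (fun hh => e4 hh.symm),
      show (("<sticker>" : String) == X) = false from beq_eq_false_iff_ne.mpr (fun hh => e5 hh.symm)] at h
  simp at h

-- main: A's loop equals B's body on every (stripped) string
lemma pv_core (s : String) :
    detect_md_media_loop s
      [("<photo>", "image"), ("<video>", "video"), ("<voice>", "audio"),
       ("<document>", "document"), ("<sticker>", "sticker")] = pvAltBody s := by
  by_cases h1 : ['<','p','h','o','t','o','>'] <+: s.toList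
  · rw [show detect_md_media_loop s
        [("<photo>", "image"), ("<video>", "video"), ("<voice>", "audio"),
         ("<document>", "document"), ("<sticker>", "sticker")] = (true, some "image") by
      simp [detect_md_media_loop, PySem.Str.startswith_eq, PySem.Chars.startswith,
        List.isPrefixOf_iff_prefix, h1]]
    exact (pv_alt_pos s ['p','h','o','t','o'] "image" (by decide) (by decide) h1).symm
  · by_cases h2 : ['<','v','i','d','e','o','>'] <+: s.toList
    · rw [show detect_md_media_loop s
          [("<photo>", "image"), ("<video>", "video"), ("<voice>", "audio"),
           ("<document>", "document"), ("<sticker>", "sticker")] = (true, some "video") by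
        simp [detect_md_media_loop, PySem.Str.startswith_eq, PySem.Chars.startswith,
          List.isPrefixOf_iff_prefix, h1, h2]]
      exact (pv_alt_pos s ['v','i','d','e','o'] "video" (by decide) (by decide) h2).symm
    · by_cases h3 : ['<','v','o','i','c','e','>'] <+: s.toList
      · rw [show detect_md_media_loop s
            [("<photo>", "image"), ("<video>", "video"), ("<voice>", "audio"),
             ("<document>", "document"), ("<sticker>", "sticker")] = (true, some "audio") by
          simp [detect_md_media_loop, PySem.Str.startswith_eq, PySem.Chars.startswith,
            List.isPrefixOf_iff_prefix, h1, h2, h3]]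
        exact (pv_alt_pos s ['v','o','i','c','e'] "audio" (by decide) (by decide) h3).symm
      · by_cases h4 : ['<','d','o','c','u','m','e','n','t','>'] <+: s.toList
        · rw [show detect_md_media_loop s
              [("<photo>", "image"), ("<video>", "video"), ("<voice>", "audio"),
               ("<document>", "document"), ("<sticker>", "sticker")] = (true, some "document") by
            simp [detect_md_media_loop, PySem.Str.startswith_eq, PySem.Chars.startswith,
              List.isPrefixOf_iff_prefix, h1, h2, h3, h4]]
          exact (pv_alt_pos s ['d','o','c','u','m','e','n','t'] "document" (by decide) (by decide) h4).symm
        · by_cases h5 : ['<','s','t','i','c','k','e','r','>'] <+: s.toList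
          · rw [show detect_md_media_loop s
                [("<photo>", "image"), ("<video>", "video"), ("<voice>", "audio"),
                 ("<document>", "document"), ("<sticker>", "sticker")] = (true, some "sticker") by
              simp [detect_md_media_loop, PySem.Str.startswith_eq, PySem.Chars.startswith,
                List.isPrefixOf_iff_prefix, h1, h2, h3, h4, h5]]
            exact (pv_alt_pos s ['s','t','i','c','k','e','r'] "sticker" (by decide) (by decide) h5).symm
          · rw [show detect_md_media_loop s
                [("<photo>", "image"), ("<video>", "video"), ("<voice>", "audio"),
                 ("<document>", "document"), ("<sticker>", "sticker")] = (false, none) by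
              simp [detect_md_media_loop, PySem.Str.startswith_eq, PySem.Chars.startswith,
                List.isPrefixOf_iff_prefix, h1, h2, h3, h4, h5]]
            unfold pvAltBody
            by_cases hsw : PySem.Str.startswith s "<" = true
            · rw [hsw]
              simp only [Bool.not_true, Bool.false_eq_true, if_false]
              by_cases hm1 : PySem.Str.find s ">" = -1
              · have hm1' : (PySem.Str.find s ">" == (-1 : Int)) = true := by rw [hm1]; rfl
                rw [hm1']
                simp
              · have hbeq : (PySem.Str.find s ">" == (-1 : Int)) = false := by
                  simpa using hm1
                rw [hbeq]
                simp only [Bool.false_eq_true, if_false]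
                have hpfx := pv_slice_prefix s hm1
                set X := PySem.Str.slice s none (some (PySem.Str.find s ">" + 1)) with hX
                match hget : PySem.Dict.get? pvTagMap X with
                | none => rfl
                | some m =>
                  exfalso
                  rcases pv_get_mem X m hget with e | e | e | e | e
                  · exact h1 (by rw [e] at hpfx; exact hpfx)
                  · exact h2 (by rw [e] at hpfx; exact hpfx)
                  · exact h3 (by rw [e] at hpfx; exact hpfx)
                  · exact h4 (by rw [e] at hpfx; exact hpfx)
                  · exact h5 (by rw [e] at hpfx; exact hpfx)
            · rw [Bool.not_eq_true] at hsw
              rw [hsw]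
              simp

-- ===== VERDICT (by name: the statement is the Claim_ definition above) =====
theorem detect_md_media_py_spec : Claim_equal_detect_md_media_py := by
  intro content _
  show detect_md_media_py content = detect_md_media_py_alt content
  rw [pv_alt_eq]
  exact pv_core (PySem.Str.strip content)
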